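-- pv_equiv track=rewrite | github.com/semeneleven/XTest | codes/cyclics/bch.py | bch
-- ===== SOURCE A (Python) =====
-- polynomials = {
--     1: [1, 0, 0, 1, 1],
--     3: [1, 1, 1, 1, 1],
--     5: [1, 1, 1]
-- }
--
-- def multiply(a, b):
--     result = (a if int(b[len(b) - 1]) else 0)
--     for i in range(len(b) - 1):
--         result = (a << (i + 1) if int(b[len(b) - i - 2]) else 0) ^ (result)
--     return result
--
-- def bch(msg, d):
--     gen_polynomial_num = int("".join([str(x) for x in polynomials[1]]), 2)
--     for i in range(3, d - 1, 2):
--         gen_polynomial_num = multiply(gen_polynomial_num, polynomials[i])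
--
--     gen_polynomial = bin(gen_polynomial_num)[2:]
--
--     msg += '0' * (15 - len(msg))
--     R = msg[msg.find('1'):]
--
--     while len(R) >= len(gen_polynomial):
--         for i in range(len(gen_polynomial)):
--             R = R[:(i)] + str(int(R[i]) ^ int(gen_polynomial[i])) + R[(i + 1):]
--
--         R = R[R.find('1'):]
--
--     R = '0' * (len(gen_polynomial) - len(R) - 1) + R
--     return msg[:len(msg) - len(R)] + R
-- ===== SOURCE B (Python) =====
-- # Integer re-implementation: carry-less products and XOR long division on ints
-- # instead of character splicing on strings.
-- _POLY_INT = {1: 0b10011, 3: 0b11111, 5: 0b111}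
--
--
-- def _clmul(a, b):
--     """Carry-less (GF(2)) product of two ints."""
--     r = 0
--     while b:
--         if b & 1:
--             r ^= a
--         a <<= 1
--         b >>= 1
--     return r
--
--
-- def bch(msg, d):
--     gen = _POLY_INT[1]
--     for i in range(3, d - 1, 2):
--         gen = _clmul(gen, _POLY_INT[i])
--     gl = gen.bit_length()
--     padded = msg + '0' * (15 - len(msg))
--     r = 0
--     for c in padded:
--         r = r * 2 + (1 if c == '1' else 0)
--     while r.bit_length() >= gl:
--         r ^= gen << (r.bit_length() - gl)
--     return padded[:len(padded) - (gl - 1)] + format(r, 'b').zfill(gl - 1)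
-- ===== Notes on version B (the rewrite author's own statement) =====
-- stated objective: alternative
-- what changed: Replaces per-character string splicing (a new string built for every XORed character, re-scanning with find) by integer arithmetic: the generator is built by carry-less multiplication on ints and the remainder by XOR long division on a single int (one shifted XOR per step, aligned via bit_length), the codeword being reassembled once at the end with format/zfill.
-- outside the precondition, e.g. on bch('00000000000001x', 3): A returns '00000000000001x', B returns '000000000000010'; on bch('00000000000000x', 3): A returns '00000000000000x', B returns '000000000000000'
import Mathlib
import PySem

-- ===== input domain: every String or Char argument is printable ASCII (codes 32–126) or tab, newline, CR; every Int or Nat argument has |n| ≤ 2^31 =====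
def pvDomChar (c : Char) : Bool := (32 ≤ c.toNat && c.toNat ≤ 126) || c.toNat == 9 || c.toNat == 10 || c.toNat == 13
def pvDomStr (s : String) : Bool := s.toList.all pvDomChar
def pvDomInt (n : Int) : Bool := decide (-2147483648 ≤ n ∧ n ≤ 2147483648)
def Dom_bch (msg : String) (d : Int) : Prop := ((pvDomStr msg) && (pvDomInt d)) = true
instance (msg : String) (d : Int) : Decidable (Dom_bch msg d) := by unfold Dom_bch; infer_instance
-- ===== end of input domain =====

-- B replaces A's per-character string splicing by integer carry-less arithmetic (XOR long division on
-- one int); equality is claimed on Pre_bch (see its comment for what is excluded).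

-- shared helper: Python's bin(n)[2:] / format(n, 'b') for n ≥ 0 (both Pythons call this built-in)
def natBinAuxF : Nat → Nat → List Char
  | 0, _ => []
  | f+1, n => if n = 0 then [] else natBinAuxF f (n / 2) ++ [if n % 2 = 1 then '1' else '0']

def natBinAux (n : Nat) : List Char := natBinAuxF n n

def natBin (n : Nat) : List Char := if n = 0 then ['0'] else natBinAux n

-- ===== PORT A =====
def polyA : PySem.Dict Int (List Int) := PySem.Dict.ofList [(1, [1,0,0,1,1]), (3, [1,1,1,1,1]), (5, [1,1,1])]

-- multiply(a, b): b's entries are the 0/1 ints of the dict; int(x) on an int is x, truthiness is ≠ 0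
def multiplyA (a : Int) (b : List Int) : Int :=
  (PySem.List.pyRange 0 ((b.length : Int) - 1) 1).foldl
    (fun result i =>
      PySem.Int.bxor
        (if PySem.List.pyGetD b ((b.length : Int) - i - 2) 0 ≠ 0 then a <<< (i + 1).toNat else 0)
        result)
    (if PySem.List.pyGetD b ((b.length : Int) - 1) 0 ≠ 0 then a else 0)

-- int(R[i]) for the 1-character string R[i]; IndexError/ValueError (outside Pre_) modelled by 0
def intOf1 (c? : Option Char) : Int :=
  match c? with
  | some c => (PySem.Int.ofChars? [c]).getD 0
  | none => 0

-- the inner 'for i in range(len(gen_polynomial))' splice loop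
def xorPassA (gen R : List Char) : List Char :=
  (PySem.List.pyRange 0 (gen.length : Int) 1).foldl
    (fun R i =>
      PySem.List.slice R none (some i)
        ++ PySem.Int.toChars
             (PySem.Int.bxor (intOf1 (PySem.List.pyGet? R i)) (intOf1 (PySem.List.pyGet? gen i)))
        ++ PySem.List.slice R (some (i + 1)) none)
    R

-- the outer 'while len(R) >= len(gen_polynomial)' loop; fuel = len(R) + 1 at the call site suffices,
-- since each pass strictly shortens R (proved below for inputs in Pre_)
def loopA : Nat → List Char → List Char → List Char
  | 0, R, _ => R
  | fuel+1, R, gen =>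
      if gen.length ≤ R.length then
        let X := xorPassA gen R
        loopA fuel (PySem.List.slice X (some (PySem.Chars.find X ['1'])) none) gen
      else R

def bchCoreA (msgL : List Char) (d : Int) : List Char :=
  let gen0 := (PySem.Int.ofCharsBase?
    (PySem.Chars.join [] ((polyA.getD 1 []).map (fun x => PySem.Int.toChars x))) 2).getD 0
  let genNum := (PySem.List.pyRange 3 (d - 1) 2).foldl (fun g i => multiplyA g (polyA.getD i [])) gen0
  -- bin(genNum)[2:]; the generator is nonnegative (a GF(2) product of nonnegative constants)
  let gen := natBin genNum.toNat
  let padded := msgL ++ List.replicate (15 - msgL.length) '0'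
  let R0 := PySem.List.slice padded (some (PySem.Chars.find padded ['1'])) none
  let Rf := loopA (R0.length + 1) R0 gen
  let Rp := List.replicate (gen.length - Rf.length - 1) '0' ++ Rf
  PySem.List.slice padded none (some ((padded.length : Int) - (Rp.length : Int))) ++ Rp

def bch (msg : String) (d : Int) : String := String.ofList (bchCoreA msg.toList d)

-- ===== PORT B =====
def polyB : PySem.Dict Int Nat := PySem.Dict.ofList [(1, 19), (3, 31), (5, 7)]

-- _clmul's while loop; the arguments are nonnegative throughout, so Nat is exact
def clmulGo : Nat → Nat → Nat → Nat → Nat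
  | 0, _, _, r => r
  | f+1, a, b, r =>
      if b = 0 then r else clmulGo f (a <<< 1) (b >>> 1) (if b &&& 1 = 1 then r ^^^ a else r)

def clmul (a b : Nat) : Nat := clmulGo b a b 0

-- n.bit_length() for n ≥ 0
def blen (n : Nat) : Nat := PySem.Int.bitLength (n : Int)

-- the 'while r.bit_length() >= gl' loop; fuel = r + 1 at the call site suffices (each XOR clears the
-- top bit, so r strictly decreases; proved below)
def modGo : Nat → Nat → Nat → Nat
  | 0, _, r => r
  | fuel+1, gen, r =>
      if blen gen ≤ blen r then modGo fuel gen (r ^^^ (gen <<< (blen r - blen gen))) else r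

def bchCoreB (msgL : List Char) (d : Int) : List Char :=
  let gen := (PySem.List.pyRange 3 (d - 1) 2).foldl (fun g i => clmul g (polyB.getD i 0)) (polyB.getD 1 0)
  let gl := blen gen
  let padded := msgL ++ List.replicate (15 - msgL.length) '0'
  let r := padded.foldl (fun r c => r * 2 + (if c == '1' then 1 else 0)) 0
  let r2 := modGo (r + 1) gen r
  PySem.List.slice padded none (some ((padded.length : Int) - ((gl : Int) - 1)))
    ++ PySem.Chars.zfill (natBin r2) ((gl : Int) - 1)

def bch_alt (msg : String) (d : Int) : String := String.ofList (bchCoreB msg.toList d)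

-- ===== PRECONDITION & SPEC =====
-- Pre_ excludes d >= 9 (A raises KeyError building the generator) and messages on which A's output embeds
-- raw message characters in the checksum field, which B (reading every non-'1' character as a 0 bit)
-- cannot reproduce: messages with a non-binary character after the first '1' (there A raises ValueError
-- in the division loop unless that suffix is shorter than the generator), and messages with no '1' at
-- all, of length >= 15, not ending in '0' (there A's find('1') == -1 sentinel makes the last raw
-- character the remainder).
def Pre_bch (msg : String) (d : Int) : Prop :=
  d ≤ 8 ∧ ((msg.toList.dropWhile (fun c => c ≠ '1')).all (fun c => c == '0' || c == '1')) = true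
    ∧ ¬ (('1' ∉ msg.toList) ∧ 15 ≤ msg.toList.length ∧ msg.toList.getLast? ≠ some '0')
instance (msg : String) (d : Int) : Decidable (Pre_bch msg d) := by unfold Pre_bch; infer_instance

def pvWitness_bch : String × Int := ("10110100101", 5)

def Spec_bch (msg : String) (d : Int) (out : String) : Prop := out = bch_alt msg d
instance (msg : String) (d : Int) (out : String) : Decidable (Spec_bch msg d out) := by
  unfold Spec_bch; infer_instance

-- ===== CLAIM (what is proved, stated in full; the proofs are below) =====
def Claim_equal_bch : Prop :=
  ∀ (msg : String) (d : Int), Dom_bch msg d → Pre_bch msg d → Spec_bch msg d (bch msg d)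

-- ===== LEMMAS AND PROOFS =====

-- the bit a character contributes (B's fold body; '1' is 1, everything else 0)
def bitc (c : Char) : Nat := if c == '1' then 1 else 0
-- the integer value both programs work with
def val (s : List Char) : Nat := s.foldl (fun a c => a * 2 + bitc c) 0
def isBin (c : Char) : Bool := c == '0' || c == '1'
-- character-level XOR (what one splice of A's inner loop writes)
def xc (a b : Char) : Char := if (a == '1') != (b == '1') then '1' else '0'

theorem val_foldl (s : List Char) (a : Nat) :
    s.foldl (fun a c => a * 2 + bitc c) a = a * 2 ^ s.length + val s := by
  induction s generalizing a with
  | nil => show a = a * 2 ^ 0 + val []; show a = a * 2 ^ 0 + 0; ring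
  | cons c t ih =>
    have h2 : val (c :: t) = bitc c * 2 ^ t.length + val t := by
      show List.foldl _ (0 * 2 + bitc c) t = _
      rw [ih]; ring
    rw [List.foldl_cons, ih, h2, List.length_cons]; ring

theorem val_cons (c : Char) (t : List Char) : val (c :: t) = bitc c * 2 ^ t.length + val t := by
  show List.foldl _ (0 * 2 + bitc c) t = _
  rw [val_foldl]; ring

theorem val_append (u v : List Char) : val (u ++ v) = val u * 2 ^ v.length + val v := by
  show List.foldl _ _ (u ++ v) = _
  rw [List.foldl_append]
  exact val_foldl v (val u)

theorem bitc_cases (c : Char) : bitc c = 0 ∨ bitc c = 1 := by unfold bitc; split <;> simp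

theorem val_lt (s : List Char) : val s < 2 ^ s.length := by
  induction s with
  | nil => simp [val]
  | cons c t ih =>
    have hv := val_cons c t
    rcases bitc_cases c with hb | hb <;> rw [hb] at hv <;>
      simp only [List.length_cons, pow_succ] <;> omega

theorem val_eq_zero (s : List Char) (h : ∀ c ∈ s, c ≠ '1') : val s = 0 := by
  induction s with
  | nil => rfl
  | cons c t ih =>
    have hc : bitc c = 0 := by
      have := h c (by simp)
      simp [bitc, this]
    have ht := ih (fun c hc => h c (by simp [hc]))
    simp [val_cons, hc, ht]

-- the central bit lemma: high/low split of XOR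
theorem xor_split (a b n x y : Nat) (hx : x < 2 ^ n) (hy : y < 2 ^ n) :
    (2 ^ n * a + x) ^^^ (2 ^ n * b + y) = 2 ^ n * (a ^^^ b) + (x ^^^ y) := by
  apply Nat.eq_of_testBit_eq
  intro j
  rw [Nat.testBit_two_pow_mul_add _ (Nat.xor_lt_two_pow hx hy)]
  simp only [Nat.testBit_xor, Nat.testBit_two_pow_mul_add _ hx, Nat.testBit_two_pow_mul_add _ hy]
  split <;> simp

theorem val_zipxor (u w : List Char) (h : u.length = w.length) :
    val (List.zipWith xc u w) = val u ^^^ val w := by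
  induction u generalizing w with
  | nil => cases w <;> simp_all [val]
  | cons c t ih =>
    cases w with
    | nil => simp at h
    | cons g v =>
      have hlen : t.length = v.length := by simpa using h
      have hbx : bitc (xc c g) = bitc c ^^^ bitc g := by
        unfold bitc xc; by_cases hc : c == '1' <;> by_cases hg : g == '1' <;> simp [hc, hg]
      have h2 : (List.zipWith xc t v).length = t.length := by simp [hlen]
      rw [List.zipWith_cons_cons, val_cons, val_cons, val_cons, h2, hlen, hbx]
      rw [ih v hlen, Nat.mul_comm (bitc c ^^^ bitc g), Nat.mul_comm (bitc c), Nat.mul_comm (bitc g)]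
      exact (xor_split (bitc c) (bitc g) v.length (val t) (val v)
        (by simpa [hlen] using val_lt t) (val_lt v)).symm

-- bit_length brackets
theorem blen_eq (m k : Nat) (h1 : 2 ^ k ≤ m) (h2 : m < 2 ^ (k + 1)) : blen m = k + 1 := by
  have hm : (m : Int) ≠ 0 := by
    have := Nat.one_le_two_pow (n := k)
    omega
  have hlt : m < 2 ^ PySem.Int.bitLength (m : Int) := by
    simpa using PySem.Int.lt_two_pow_bitLength (m : Int)
  have hge : 2 ^ (PySem.Int.bitLength (m : Int) - 1) ≤ m := by
    simpa using PySem.Int.two_pow_bitLength_le (m : Int) hm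
  have e1 : k < PySem.Int.bitLength (m : Int) :=
    (Nat.pow_lt_pow_iff_right (by omega)).mp (lt_of_le_of_lt h1 hlt)
  have e2 : PySem.Int.bitLength (m : Int) - 1 < k + 1 :=
    (Nat.pow_lt_pow_iff_right (by omega)).mp (lt_of_le_of_lt hge h2)
  unfold blen
  omega

theorem blen_zero : blen 0 = 0 := by decide

theorem blen_le (m n : Nat) (h : m < 2 ^ n) : blen m ≤ n := by
  by_cases hm : m = 0
  · subst hm; simp [blen, PySem.Int.bitLength_zero]
  · have hge : 2 ^ (PySem.Int.bitLength (m : Int) - 1) ≤ m := by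
      simpa using PySem.Int.two_pow_bitLength_le (m : Int) (by exact_mod_cast hm)
    have : PySem.Int.bitLength (m : Int) - 1 < n :=
      (Nat.pow_lt_pow_iff_right (by omega)).mp (lt_of_le_of_lt hge h)
    have hp : 0 < blen m := by
      unfold blen
      rcases Nat.eq_zero_or_pos (PySem.Int.bitLength (m : Int)) with h0 | h0
      · exfalso
        have := hge
        rw [h0] at this
        simp at this
        have hlt : m < 2 ^ PySem.Int.bitLength (m : Int) := by
          simpa using PySem.Int.lt_two_pow_bitLength (m : Int)
        rw [h0] at hlt
        omega
      · exact h0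
    unfold blen at *
    omega

theorem blen_le_self (m : Nat) : blen m ≤ m := by
  by_cases hm : m = 0
  · subst hm; simp [blen, PySem.Int.bitLength_zero]
  · have hge : 2 ^ (blen m - 1) ≤ m := by
      simpa [blen] using PySem.Int.two_pow_bitLength_le (m : Int) (by exact_mod_cast hm)
    have : blen m - 1 < 2 ^ (blen m - 1) := Nat.lt_two_pow_self
    omega

-- a binary string beginning with '1' has the canonical length of its value
theorem blen_val_head1 (s : List Char) (h1 : s.head? = some '1') :
    blen (val s) = s.length := by
  cases s with
  | nil => simp at h1
  | cons c t =>
    have hc : c = '1' := by simpa using h1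
    subst hc
    have hv := val_cons '1' t
    rw [show bitc '1' = 1 by decide] at hv
    apply blen_eq
    · omega
    · have := val_lt t
      simp only [List.length_cons, pow_succ]
      omega

-- canonical binary representation
theorem natBinAuxF_congr (f : Nat) : ∀ (f' n : Nat), n ≤ f → n ≤ f' →
    natBinAuxF f n = natBinAuxF f' n := by
  induction f with
  | zero =>
    intro f' n h h'
    have : n = 0 := by omega
    subst this
    cases f' <;> simp [natBinAuxF]
  | succ f ih =>
    intro f' n h h'
    by_cases hn : n = 0
    · subst hn
      cases f' <;> simp [natBinAuxF]
    · cases f' with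
      | zero => omega
      | succ f' =>
        have hd : n / 2 ≤ f := by omega
        have hd' : n / 2 ≤ f' := by omega
        simp only [natBinAuxF, if_neg hn]
        rw [ih f' (n / 2) hd hd']

theorem natBinAux_eq (n : Nat) (h : 0 < n) :
    natBinAux n = natBinAux (n / 2) ++ [if n % 2 = 1 then '1' else '0'] := by
  unfold natBinAux
  cases n with
  | zero => omega
  | succ k =>
    simp only [natBinAuxF, if_neg (by omega : ¬ (k + 1 = 0))]
    rw [natBinAuxF_congr k ((k+1)/2) ((k+1)/2) (by omega) (by omega)]

theorem val_pos_of_head1 (s : List Char) (h1 : s.head? = some '1') : 0 < val s := by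
  cases s with
  | nil => simp at h1
  | cons c t =>
    have hc : c = '1' := by simpa using h1
    subst hc
    have hv := val_cons '1' t
    rw [show bitc '1' = 1 by decide] at hv
    have : 0 < 2 ^ t.length := Nat.two_pow_pos t.length
    omega

theorem natBinAux_canon (s : List Char) (hb : s.all isBin = true) (h1 : s.head? = some '1') :
    natBinAux (val s) = s := by
  induction s using List.reverseRecOn with
  | nil => simp at h1
  | append_singleton ys c ih =>
    have hvc : val [c] = bitc c := by
      show 0 * 2 + bitc c = bitc c
      ring
    have hva : val (ys ++ [c]) = val ys * 2 + bitc c := by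
      have hl : ([c] : List Char).length = 1 := rfl
      rw [val_append, hvc, hl]; ring
    have hb' : ys.all isBin = true ∧ isBin c = true := by
      simpa [List.all_append] using hb
    have hcbin : isBin c = true := hb'.2
    cases ys with
    | nil =>
      have hc : c = '1' := by simpa using h1
      subst hc
      simp only [List.nil_append] at hva ⊢
      rw [hva]
      decide
    | cons y t =>
      have hysne : (y :: t) ≠ [] := by simp
      have hh : (y :: t).head? = some '1' := by
        rw [List.head?_append_of_ne_nil _ hysne] at h1
        exact h1
      have hybin : (y :: t).all isBin = true := hb'.1
      have hpos := val_pos_of_head1 _ hh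
      have hbc := bitc_cases c
      have hvpos : 0 < val (y :: t) * 2 + bitc c := by omega
      rw [hva, natBinAux_eq _ hvpos]
      have hdiv : (val (y :: t) * 2 + bitc c) / 2 = val (y :: t) := by omega
      have hmod : (val (y :: t) * 2 + bitc c) % 2 = bitc c := by omega
      rw [hdiv, hmod, ih hybin hh]
      congr 1
      have : isBin c = true := hcbin
      simp only [isBin, Bool.or_eq_true, beq_iff_eq] at this
      rcases this with h0 | h0 <;> subst h0 <;> simp [bitc]

theorem natBin_canon (s : List Char) (hb : s.all isBin = true) (h1 : s.head? = some '1') :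
    natBin (val s) = s := by
  have hpos := val_pos_of_head1 s h1
  unfold natBin
  rw [if_neg (by omega)]
  exact natBinAux_canon s hb h1

theorem isBin_cases (c : Char) (h : isBin c = true) : c = '0' ∨ c = '1' := by
  simpa [isBin] using h

theorem splice_char (c g : Char) (hc : isBin c = true) (hg : isBin g = true) :
    PySem.Int.toChars (PySem.Int.bxor (intOf1 (some c)) (intOf1 (some g))) = [xc c g] := by
  rcases isBin_cases c hc with h1 | h1 <;> rcases isBin_cases g hg with h2 | h2 <;>
    subst h1 <;> subst h2 <;> decide

-- ===== the inner splice loop is a zipWith =====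
theorem xorPass_go (gen R : List Char) (hg : gen.all isBin = true) (hR : R.all isBin = true)
    (hlen : gen.length ≤ R.length) :
    ∀ (m j : Nat), j + m = gen.length →
    (PySem.List.pyRange (j : Int) (gen.length : Int) 1).foldl
      (fun R i =>
        PySem.List.slice R none (some i)
          ++ PySem.Int.toChars
               (PySem.Int.bxor (intOf1 (PySem.List.pyGet? R i)) (intOf1 (PySem.List.pyGet? gen i)))
          ++ PySem.List.slice R (some (i + 1)) none)
      (List.zipWith xc (R.take j) (gen.take j) ++ R.drop j)
    = List.zipWith xc (R.take gen.length) gen ++ R.drop gen.length := by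
  intro m
  induction m with
  | zero =>
    intro j hj
    have hj' : j = gen.length := by omega
    subst hj'
    rw [PySem.List.pyRange_one_eq_nil (by omega)]
    simp [List.take_length]
  | succ m ih =>
    intro j hj
    have hjlt : j < gen.length := by omega
    have hjR : j < R.length := by omega
    have hzlen : (List.zipWith xc (R.take j) (gen.take j)).length = j := by
      simp [List.length_zipWith]
      omega
    rw [PySem.List.pyRange_one_cons (by exact_mod_cast hjlt)]
    rw [List.foldl_cons]
    have hstate :
        (PySem.List.slice (List.zipWith xc (R.take j) (gen.take j) ++ R.drop j) none (some (j : Int))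
          ++ PySem.Int.toChars
               (PySem.Int.bxor
                 (intOf1 (PySem.List.pyGet? (List.zipWith xc (R.take j) (gen.take j) ++ R.drop j) (j : Int)))
                 (intOf1 (PySem.List.pyGet? gen (j : Int))))
          ++ PySem.List.slice (List.zipWith xc (R.take j) (gen.take j) ++ R.drop j) (some ((j : Int) + 1)) none)
        = List.zipWith xc (R.take (j+1)) (gen.take (j+1)) ++ R.drop (j+1) := by
      have e1 : PySem.List.slice (List.zipWith xc (R.take j) (gen.take j) ++ R.drop j) none (some (j : Int))
          = List.zipWith xc (R.take j) (gen.take j) := by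
        rw [PySem.List.slice_to_natCast]
        exact List.take_left' hzlen
      have e2 : PySem.List.pyGet? (List.zipWith xc (R.take j) (gen.take j) ++ R.drop j) (j : Int)
          = some R[j] := by
        rw [PySem.List.pyGet?_natCast, List.getElem?_append_right (by omega), hzlen]
        simp [List.getElem?_drop]
      have e3 : PySem.List.pyGet? gen (j : Int) = some gen[j] := by
        rw [PySem.List.pyGet?_natCast]
        exact List.getElem?_eq_getElem hjlt
      have hcb : isBin R[j] = true := by
        have := List.all_eq_true.mp hR
        exact this _ (List.getElem_mem hjR)
      have hgb : isBin gen[j] = true := by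
        have := List.all_eq_true.mp hg
        exact this _ (List.getElem_mem hjlt)
      have e4 : PySem.List.slice (List.zipWith xc (R.take j) (gen.take j) ++ R.drop j) (some ((j : Int) + 1)) none
          = R.drop (j+1) := by
        have : ((j : Int) + 1) = ((j + 1 : Nat) : Int) := by push_cast; ring
        rw [this, PySem.List.slice_from_natCast]
        have h1 : j + 1 = (List.zipWith xc (R.take j) (gen.take j)).length + 1 := by omega
        rw [h1, List.drop_length_add_append, List.drop_drop, hzlen]
      rw [e1, e2, e3, e4, splice_char _ _ hcb hgb]
      have e5 : R.take (j+1) = R.take j ++ [R[j]] := by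
        rw [List.take_add_one]
        simp [List.getElem?_eq_getElem hjR]
      have e6 : gen.take (j+1) = gen.take j ++ [gen[j]] := by
        rw [List.take_add_one]
        simp [List.getElem?_eq_getElem hjlt]
      rw [e5, e6, List.zipWith_append (by simp; omega)]
      simp
    rw [hstate]
    have : (j : Int) + 1 = ((j + 1 : Nat) : Int) := by push_cast; ring
    rw [this]
    exact ih (j+1) (by omega)

theorem xorPass_spec (gen R : List Char) (hg : gen.all isBin = true) (hR : R.all isBin = true)
    (hlen : gen.length ≤ R.length) :
    xorPassA gen R = List.zipWith xc (R.take gen.length) gen ++ R.drop gen.length := by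
  have := xorPass_go gen R hg hR hlen gen.length 0 (by omega)
  simpa [xorPassA] using this

-- ===== the division loops run in lockstep =====
def RepV (R : List Char) (r : Nat) : Prop :=
  R.all isBin = true ∧ val R = r ∧ R.length = max (blen r) 1

-- ===== strip: R[R.find('1'):] =====
theorem strip_spec (X : List Char) (hb : X.all isBin = true) (hne : X ≠ []) :
    RepV (PySem.List.slice X (some (PySem.Chars.find X ['1'])) none) (val X) := by
  have hall := List.all_eq_true.mp hb
  rcases eq_or_lt_of_le (PySem.Chars.neg_one_le_find X ['1']) with hf | hf
  · -- find = -1 : no '1' in X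
    have hno : '1' ∉ X := by
      have := (PySem.Chars.find_eq_neg_one_iff X ['1']).mp hf.symm
      simpa [List.singleton_infix_iff] using this
    have hvz : val X = 0 := val_eq_zero X (fun c hc => by rintro rfl; exact hno hc)
    rw [← hf, PySem.List.slice_from_neg_one]
    rw [List.drop_length_sub_one hne]
    have hlast : X.getLast hne = '0' := by
      have hm : X.getLast hne ∈ X := List.getLast_mem hne
      rcases isBin_cases _ (hall _ hm) with h | h
      · exact h
      · exact absurd (h ▸ hm) hno
    refine ⟨?_, ?_, ?_⟩
    · rw [hlast]; decide
    · rw [hvz, hlast]; decide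
    · rw [hvz, blen_zero]; rfl
  · -- find ≥ 0
    have hf0 : 0 ≤ PySem.Chars.find X ['1'] := by omega
    obtain ⟨hpre, hmin⟩ := PySem.Chars.find_spec hf0
    set n := (PySem.Chars.find X ['1']).toNat with hn
    have hdne : X.drop n ≠ [] := by
      intro h
      rw [h] at hpre
      simp [List.prefix_nil] at hpre
    have hnlt : n < X.length := by
      by_contra h
      exact hdne (List.drop_eq_nil_of_le (by omega))
    have hhead : (X.drop n).head? = some '1' := by
      obtain ⟨t, ht⟩ := hpre
      rw [← ht]
      rfl
    have htake : ∀ c ∈ X.take n, c ≠ '1' := by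
      intro c hc
      obtain ⟨i, hi, hrc⟩ := List.mem_iff_getElem.mp hc
      have hiX : i < n := by
        simp [List.length_take] at hi
        omega
      have hne1 := hmin i hiX
      intro hc1
      apply hne1
      have : (X.drop i).head? = some '1' := by
        rw [List.head?_drop]
        have : X[i]? = some c := by
          rw [List.getElem?_eq_getElem (by omega)]
          rw [← hrc]
          simp [List.getElem_take]
        rw [this, hc1]
      obtain ⟨w, hw⟩ := List.head?_eq_some_iff.mp this
      exact ⟨w, by rw [hw]; rfl⟩
    have hvX : val X = val (X.drop n) := by
      conv_lhs => rw [← List.take_append_drop n X]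
      rw [val_append, val_eq_zero _ htake]
      ring
    rw [PySem.List.slice_from _ hf0, ← hn]
    have hdbin : (X.drop n).all isBin = true := by
      apply List.all_eq_true.mpr
      intro c hc
      exact hall c (List.mem_of_mem_drop hc)
    have hblen : blen (val (X.drop n)) = (X.drop n).length := blen_val_head1 _ hhead
    refine ⟨hdbin, hvX.symm, ?_⟩
    rw [hvX, hblen]
    have : (X.drop n).length ≠ 0 := by
      intro h
      exact hdne (List.eq_nil_of_length_eq_zero h)
    omega

theorem head1_of_blen (s : List Char) (hb : s.all isBin = true) (hne : s ≠ [])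
    (h : blen (val s) = s.length) : s.head? = some '1' := by
  cases s with
  | nil => exact absurd rfl hne
  | cons c t =>
    rcases isBin_cases c (by have := List.all_eq_true.mp hb; exact this c (by simp)) with hc | hc
    · exfalso
      subst hc
      have hv : val ('0' :: t) = val t := by
        rw [val_cons, show bitc '0' = 0 by decide]
        ring
      have := blen_le (val t) t.length (val_lt t)
      rw [hv, List.length_cons] at h
      omega
    · simp [hc]

theorem xc_bin (a b : Char) : isBin (xc a b) = true := by
  unfold xc isBin
  split <;> decide

theorem zip_all_bin (u w : List Char) : (List.zipWith xc u w).all isBin = true := by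
  induction u generalizing w with
  | nil => simp
  | cons c t ih =>
    cases w with
    | nil => simp
    | cons g v => simp [xc_bin, ih v]

theorem val_head0_lt (s : List Char) (c : Char) (h : s.head? = some c) (hc : bitc c = 0) :
    val s < 2 ^ (s.length - 1) := by
  obtain ⟨t, rfl⟩ := List.head?_eq_some_iff.mp h
  rw [val_cons, hc]
  simpa using val_lt t

theorem sim (G : Nat) (gs : List Char) (hgs : gs.all isBin = true) (hgv : val gs = G)
    (hglen : gs.length = blen G) (hgl : 2 ≤ blen G) (hg1 : gs.head? = some '1')
    (k : Nat) : ∀ (R : List Char) (r fA fB : Nat), RepV R r → R.length = k → k < fA → k < fB →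
    RepV (loopA fA R gs) (modGo fB G r) ∧ (loopA fA R gs).length < blen G := by
  induction k using Nat.strong_induction_on with
  | _ k ih =>
  intro R r fA fB hRep hk hfA hfB
  obtain ⟨hbin, hval, hlen⟩ := hRep
  cases fA with
  | zero => omega
  | succ fA =>
  cases fB with
  | zero => omega
  | succ fB =>
  by_cases hcond : gs.length ≤ R.length
  case neg =>
    have hbr : blen r ≤ R.length := by omega
    have hA : loopA (fA+1) R gs = R := by
      show (if gs.length ≤ R.length then _ else R) = R
      rw [if_neg hcond]
    have hB : modGo (fB+1) G r = r := by
      show (if blen G ≤ blen r then _ else r) = r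
      rw [if_neg (by omega)]
    rw [hA, hB]
    exact ⟨⟨hbin, hval, hlen⟩, by omega⟩
  case pos =>
    have hL2 : 2 ≤ R.length := by omega
    have hblr : blen r = R.length := by omega
    have hhead : R.head? = some '1' := head1_of_blen R hbin (by
        intro h
        rw [h] at hL2
        simp at hL2) (by rw [hval, hblr])
    have hX := xorPass_spec gs R hgs hbin hcond
    -- value of the XORed string
    have hzl : (R.take gs.length).length = gs.length := by
      simp
      omega
    have hdl : (R.drop gs.length).length = R.length - gs.length := by simp
    have hvXzip : val (List.zipWith xc (R.take gs.length) gs) = val (R.take gs.length) ^^^ G := by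
      rw [val_zipxor _ _ hzl, hgv]
    have hvR : r = val (R.take gs.length) * 2 ^ (R.length - gs.length) + val (R.drop gs.length) := by
      rw [← hval]
      conv_lhs => rw [← List.take_append_drop gs.length R]
      rw [val_append, hdl]
    have hvX : val (xorPassA gs R) = r ^^^ (G <<< (blen r - blen G)) := by
      rw [hX, val_append, hdl]
      rw [hvXzip, hblr, ← hglen, Nat.shiftLeft_eq, hvR]
      have hd2 : val (R.drop gs.length) < 2 ^ (R.length - gs.length) := by
        have := val_lt (R.drop gs.length)
        rwa [hdl] at this
      calc (val (R.take gs.length) ^^^ G) * 2 ^ (R.length - gs.length) + val (R.drop gs.length)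
          = 2 ^ (R.length - gs.length) * (val (R.take gs.length) ^^^ G)
            + (val (R.drop gs.length) ^^^ 0) := by rw [Nat.xor_zero]; ring
        _ = (2 ^ (R.length - gs.length) * val (R.take gs.length) + val (R.drop gs.length))
            ^^^ (2 ^ (R.length - gs.length) * G + 0) := by
              rw [xor_split _ _ _ _ _ hd2 (by positivity)]
        _ = (val (R.take gs.length) * 2 ^ (R.length - gs.length) + val (R.drop gs.length))
            ^^^ (G * 2 ^ (R.length - gs.length)) := by rw [Nat.add_zero]; ring_nf
    -- the XORed string starts with '0'
    have hXhead : (xorPassA gs R).head? = some '0' := by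
      obtain ⟨Rt, hRt⟩ := List.head?_eq_some_iff.mp hhead
      obtain ⟨gt, hgt⟩ := List.head?_eq_some_iff.mp hg1
      rw [hX, hRt, hgt]
      have : ((('1' : Char) :: Rt).take (('1' :: gt) : List Char).length)
          = '1' :: Rt.take gt.length := by
        simp [List.take_succ_cons]
      rw [this, List.zipWith_cons_cons]
      simp [xc]
    have hXlen : (xorPassA gs R).length = R.length := by
      rw [hX]
      simp
      omega
    have hXbin : (xorPassA gs R).all isBin = true := by
      rw [hX, List.all_append]
      rw [zip_all_bin]
      have : (R.drop gs.length).all isBin = true := by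
        apply List.all_eq_true.mpr
        intro c hc
        exact List.all_eq_true.mp hbin c (List.mem_of_mem_drop hc)
      rw [this]
      rfl
    have hXne : xorPassA gs R ≠ [] := by
      intro h
      rw [h] at hXlen
      simp at hXlen
      omega
    -- one step of each loop
    have hA : loopA (fA+1) R gs
        = loopA fA (PySem.List.slice (xorPassA gs R)
            (some (PySem.Chars.find (xorPassA gs R) ['1'])) none) gs := by
      show (if gs.length ≤ R.length then _ else R) = _
      rw [if_pos hcond]
    have hB : modGo (fB+1) G r = modGo fB G (r ^^^ (G <<< (blen r - blen G))) := by
      show (if blen G ≤ blen r then _ else r) = _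
      rw [if_pos (by omega)]
    rw [hA, hB]
    -- the stripped string represents the new value
    have hstrip := strip_spec (xorPassA gs R) hXbin hXne
    rw [hvX] at hstrip
    set R' := PySem.List.slice (xorPassA gs R)
        (some (PySem.Chars.find (xorPassA gs R) ['1'])) none with hR'
    -- strictly smaller
    have hvX0 : val (xorPassA gs R) < 2 ^ (R.length - 1) := by
      have := val_head0_lt (xorPassA gs R) '0' hXhead (by decide)
      rwa [hXlen] at this
    have hblX : blen (val (xorPassA gs R)) ≤ R.length - 1 := blen_le _ _ hvX0
    have hR'len : R'.length < R.length := by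
      have := hstrip.2.2
      rw [← hvX] at this
      omega
    exact ih R'.length (by omega) R' _ fA fB hstrip rfl (by omega) (by omega)
-- the generator, per bucket of d
theorem rangeEq (d : Int) (hd : d ≤ 8) :
    PySem.List.pyRange 3 (d - 1) 2 = if d ≤ 4 then [] else if d ≤ 6 then [3] else [3, 5] := by
  rw [PySem.List.pyRange_of_pos _ _ (by norm_num)]
  by_cases h3 : (3 : Int) < d - 1
  · rw [if_pos h3]
    by_cases h6 : d ≤ 6
    · have hv : ((d - 1 - 3 + 2 - 1) / 2 : Int).toNat = 1 := by omega
      rw [hv, if_neg (by omega : ¬ d ≤ 4), if_pos h6]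
      norm_num [List.range_succ]
    · have hv : ((d - 1 - 3 + 2 - 1) / 2 : Int).toNat = 2 := by omega
      rw [hv, if_neg (by omega : ¬ d ≤ 4), if_neg h6]
      norm_num [List.range_succ]
  · rw [if_pos (by omega : d ≤ 4), if_neg h3]
    simp

-- Python's str.zfill on an unsigned argument
theorem zfill_nosign (cs : List Char) (w : Nat) (hne : cs ≠ [])
    (hs : ∀ c, cs.head? = some c → c ≠ '+' ∧ c ≠ '-') :
    PySem.Chars.zfill cs (w : Int) = List.replicate (w - cs.length) '0' ++ cs := by
  unfold PySem.Chars.zfill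
  by_cases hw : (w : Int) ≤ (cs.length : Int)
  · rw [if_pos hw]
    have : w - cs.length = 0 := by omega
    rw [this]
    simp
  · rw [if_neg hw]
    cases cs with
    | nil => exact absurd rfl hne
    | cons c rest =>
      have := hs c rfl
      dsimp only
      rw [if_neg (by tauto)]
      simp

theorem natBin_repv (Rf : List Char) (r2 : Nat) (h : RepV Rf r2) : natBin r2 = Rf := by
  obtain ⟨hbin, hv, hl⟩ := h
  by_cases hr : r2 = 0
  · subst hr
    have hb0 : blen 0 = 0 := by decide
    cases Rf with
    | nil => exfalso; simp at hl; omega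
    | cons c t =>
      have ht : t = [] := by
        have : t.length = 0 := by simp at hl; omega
        exact List.eq_nil_of_length_eq_zero this
      subst ht
      have hc0 : bitc c = 0 := by
        have hvc : val [c] = bitc c := by
          show 0 * 2 + bitc c = bitc c
          ring
        rw [hvc] at hv
        exact hv
      rcases isBin_cases c (by have := List.all_eq_true.mp hbin; exact this c (by simp)) with h | h
      · subst h; rfl
      · subst h; simp [bitc] at hc0
  · have hb1 : 1 ≤ blen r2 := by
      by_contra h
      have hb0 : blen r2 = 0 := by omega
      have := blen_eq r2 0
      rcases Nat.eq_zero_or_pos r2 with h0 | h0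
      · exact hr h0
      · have hge : 2 ^ (blen r2 - 1) ≤ r2 := by
          simpa [blen] using PySem.Int.two_pow_bitLength_le (r2 : Int) (by exact_mod_cast hr)
        have hlt : r2 < 2 ^ blen r2 := by
          simpa [blen] using PySem.Int.lt_two_pow_bitLength (r2 : Int)
        rw [hb0] at hlt
        omega
    have hll : Rf.length = blen r2 := by omega
    have hhead := head1_of_blen Rf hbin (by
        intro h
        rw [h] at hll
        simp at hll
        omega) (by rw [hv, ← hll])
    rw [← hv]
    exact natBin_canon Rf hbin hhead

theorem dropWhile_eq_drop (X : List Char) (n : Nat) (c : Char)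
    (h1 : ∀ x ∈ X.take n, x ≠ '1') (h2 : (X.drop n).head? = some c) (hc : c = '1') :
    X.dropWhile (fun x => x ≠ '1') = X.drop n := by
  conv_lhs => rw [← List.take_append_drop n X]
  rw [List.dropWhile_append]
  have hdw : (X.take n).dropWhile (fun x => x ≠ '1') = [] := by
    rw [List.dropWhile_eq_nil_iff]
    intro x hx
    simpa using h1 x hx
  obtain ⟨t, ht⟩ := List.head?_eq_some_iff.mp h2
  subst hc
  rw [hdw, ht]
  simp

-- ===== main equivalence on the list level, for a fixed generator =====
theorem assemble (msgL : List Char) (G : Nat) (gs : List Char)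
    (hgs : gs.all isBin = true) (hgv : val gs = G) (hglen : gs.length = blen G)
    (hgl : 2 ≤ blen G) (hgl' : blen G ≤ 12) (hg1 : gs.head? = some '1')
    (hbin : ((msgL.dropWhile (fun c => c ≠ '1')).all (fun c => c == '0' || c == '1')) = true)
    (hnD : ¬ (('1' ∉ msgL) ∧ 15 ≤ msgL.length ∧ msgL.getLast? ≠ some '0')) :
    (PySem.List.slice (msgL ++ List.replicate (15 - msgL.length) '0') none
      (some (((msgL ++ List.replicate (15 - msgL.length) '0').length : Int)
        - ((List.replicate (gs.length
              - (loopA ((PySem.List.slice (msgL ++ List.replicate (15 - msgL.length) '0')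
                  (some (PySem.Chars.find (msgL ++ List.replicate (15 - msgL.length) '0') ['1'])) none).length + 1)
                 (PySem.List.slice (msgL ++ List.replicate (15 - msgL.length) '0')
                  (some (PySem.Chars.find (msgL ++ List.replicate (15 - msgL.length) '0') ['1'])) none) gs).length - 1) '0'
            ++ loopA ((PySem.List.slice (msgL ++ List.replicate (15 - msgL.length) '0')
                  (some (PySem.Chars.find (msgL ++ List.replicate (15 - msgL.length) '0') ['1'])) none).length + 1)
                 (PySem.List.slice (msgL ++ List.replicate (15 - msgL.length) '0')
                  (some (PySem.Chars.find (msgL ++ List.replicate (15 - msgL.length) '0') ['1'])) none) gs).length : Int)))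
      ++ (List.replicate (gs.length
              - (loopA ((PySem.List.slice (msgL ++ List.replicate (15 - msgL.length) '0')
                  (some (PySem.Chars.find (msgL ++ List.replicate (15 - msgL.length) '0') ['1'])) none).length + 1)
                 (PySem.List.slice (msgL ++ List.replicate (15 - msgL.length) '0')
                  (some (PySem.Chars.find (msgL ++ List.replicate (15 - msgL.length) '0') ['1'])) none) gs).length - 1) '0'
            ++ loopA ((PySem.List.slice (msgL ++ List.replicate (15 - msgL.length) '0')
                  (some (PySem.Chars.find (msgL ++ List.replicate (15 - msgL.length) '0') ['1'])) none).length + 1)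
                 (PySem.List.slice (msgL ++ List.replicate (15 - msgL.length) '0')
                  (some (PySem.Chars.find (msgL ++ List.replicate (15 - msgL.length) '0') ['1'])) none) gs))
    = (PySem.List.slice (msgL ++ List.replicate (15 - msgL.length) '0') none
        (some (((msgL ++ List.replicate (15 - msgL.length) '0').length : Int) - ((blen G : Int) - 1)))
      ++ PySem.Chars.zfill
          (natBin (modGo ((msgL ++ List.replicate (15 - msgL.length) '0').foldl
              (fun r c => r * 2 + (if c == '1' then 1 else 0)) 0 + 1) G
            ((msgL ++ List.replicate (15 - msgL.length) '0').foldl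
              (fun r c => r * 2 + (if c == '1' then 1 else 0)) 0)))
          ((blen G : Int) - 1)) := by
  set padded := msgL ++ List.replicate (15 - msgL.length) '0' with hpad
  have hplen : 15 ≤ padded.length := by
    rw [hpad]
    simp
    omega
  have hpne : padded ≠ [] := by
    intro h
    rw [h] at hplen
    simp at hplen
  have hr0 : padded.foldl (fun r c => r * 2 + (if c == '1' then 1 else 0)) 0 = val padded := rfl
  rw [hr0]
  have hpadbin : (padded.dropWhile (fun c => c ≠ '1')).all isBin = true := by
    rw [hpad, List.dropWhile_append]
    by_cases he : (msgL.dropWhile (fun c => c ≠ '1')).isEmpty = true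
    · rw [if_pos he]
      apply List.all_eq_true.mpr
      intro c hc
      have := List.Sublist.mem hc (List.dropWhile_sublist _)
      have hc0 : c = '0' := List.eq_of_mem_replicate this
      subst hc0
      rfl
    · rw [if_neg he, List.all_append]
      have h1 : (msgL.dropWhile (fun c => c ≠ '1')).all isBin = true := hbin
      rw [h1]
      have h2 : (List.replicate (15 - msgL.length) '0').all isBin = true := by
        apply List.all_eq_true.mpr
        intro c hc
        have hc0 : c = '0' := List.eq_of_mem_replicate hc
        subst hc0
        rfl
      rw [h2]
      rfl
  rcases eq_or_lt_of_le (PySem.Chars.neg_one_le_find padded ['1']) with hf | hf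
  · -- no '1' anywhere: both checksums are all zeros
    have hno : '1' ∉ padded := by
      have := (PySem.Chars.find_eq_neg_one_iff padded ['1']).mp hf.symm
      simpa [List.singleton_infix_iff] using this
    have hvz : val padded = 0 := val_eq_zero padded (fun c hc => by rintro rfl; exact hno hc)
    have hR0 : PySem.List.slice padded (some (PySem.Chars.find padded ['1'])) none
        = [padded.getLast hpne] := by
      rw [← hf, PySem.List.slice_from_neg_one, List.drop_length_sub_one hpne]
    have hlast? : padded.getLast? = some '0' := by
      by_cases hlen15 : 15 ≤ msgL.length
      · have hrep0 : (15 - msgL.length) = 0 := by omega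
        have hpm : padded = msgL := by rw [hpad, hrep0]; simp
        have hmne : msgL ≠ [] := by
          intro h
          rw [h] at hlen15
          simp at hlen15
        have hno1m : '1' ∉ msgL := by
          intro h
          apply hno
          rw [hpm]
          exact h
        have hlast0 : msgL.getLast? = some '0' := by
          by_contra h
          exact hnD ⟨hno1m, by omega, h⟩
        rw [hpm]
        exact hlast0
      · have hk : 15 - msgL.length = (15 - msgL.length - 1) + 1 := by omega
        have hrne : List.replicate (15 - msgL.length) '0' ≠ ([] : List Char) := by
          rw [hk]
          simp
        rw [hpad, List.getLast?_append_of_ne_nil _ hrne, List.getLast?_replicate,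
          if_neg (by omega)]
    have hlast : padded.getLast hpne = '0' := by
      have := List.getLast?_eq_getLast (l := padded) hpne
      rw [hlast?] at this
      exact (Option.some_injective _ this.symm)
    rw [hR0, hlast, hvz]
    have hloop : loopA (([('0' : Char)].length) + 1) ['0'] gs = ['0'] := by
      show (if gs.length ≤ [('0' : Char)].length then _ else ['0']) = ['0']
      rw [if_neg (by simp only [List.length_cons, List.length_nil]; omega)]
    simp only [hloop]
    have hmod : modGo (0 + 1) G 0 = 0 := by
      show (if blen G ≤ blen 0 then _ else 0) = 0
      rw [if_neg (by rw [blen_zero]; omega)]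
    rw [hmod]
    have hnb0 : natBin 0 = ['0'] := rfl
    rw [hnb0]
    have hzf : PySem.Chars.zfill ['0'] ((blen G : Int) - 1)
        = List.replicate (blen G - 1 - 1) '0' ++ ['0'] := by
      have hcast : ((blen G : Int) - 1) = ((blen G - 1 : Nat) : Int) := by omega
      rw [hcast, zfill_nosign ['0'] (blen G - 1) (by simp) (by intro c h; simp at h; subst h; decide)]
      simp
    rw [hzf]
    have hrep : gs.length - [('0' : Char)].length - 1 = blen G - 1 - 1 := by
      simp only [List.length_cons, List.length_nil]
      omega
    rw [hrep]
    have hlen2 : (List.replicate (blen G - 1 - 1) '0' ++ [('0' : Char)]).length = blen G - 1 := by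
      simp
      omega
    rw [hlen2]
    have hcast2 : ((blen G - 1 : Nat) : Int) = (blen G : Int) - 1 := by omega
    rw [hcast2]
  · -- a '1' exists: the division loops run in lockstep
    have hf0 : 0 ≤ PySem.Chars.find padded ['1'] := by omega
    obtain ⟨hpre, hmin⟩ := PySem.Chars.find_spec hf0
    set n := (PySem.Chars.find padded ['1']).toNat with hn
    have hdne : padded.drop n ≠ [] := by
      intro h
      rw [h] at hpre
      simp [List.prefix_nil] at hpre
    have hnlt : n < padded.length := by
      by_contra h
      exact hdne (List.drop_eq_nil_of_le (by omega))
    have hhead : (padded.drop n).head? = some '1' := by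
      obtain ⟨t, ht⟩ := hpre
      rw [← ht]
      rfl
    have htake : ∀ c ∈ padded.take n, c ≠ '1' := by
      intro c hc
      obtain ⟨i, hi, hrc⟩ := List.mem_iff_getElem.mp hc
      have hiX : i < n := by
        simp [List.length_take] at hi
        omega
      have hne1 := hmin i hiX
      intro hc1
      apply hne1
      have : (padded.drop i).head? = some '1' := by
        rw [List.head?_drop]
        have : padded[i]? = some c := by
          rw [List.getElem?_eq_getElem (by omega)]
          rw [← hrc]
          simp [List.getElem_take]
        rw [this, hc1]
      obtain ⟨w, hw⟩ := List.head?_eq_some_iff.mp this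
      exact ⟨w, by rw [hw]; rfl⟩
    have hR0 : PySem.List.slice padded (some (PySem.Chars.find padded ['1'])) none
        = padded.drop n := by
      rw [PySem.List.slice_from _ hf0]
    have hdw : padded.dropWhile (fun c => c ≠ '1') = padded.drop n :=
      dropWhile_eq_drop padded n '1' htake hhead rfl
    have hR0bin : (padded.drop n).all isBin = true := by
      rw [← hdw]
      exact hpadbin
    have hvp : val padded = val (padded.drop n) := by
      conv_lhs => rw [← List.take_append_drop n padded]
      rw [val_append, val_eq_zero _ htake]
      ring
    have hblen0 : blen (val (padded.drop n)) = (padded.drop n).length :=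
      blen_val_head1 _ hhead
    have hrep0 : RepV (padded.drop n) (val padded) := by
      refine ⟨hR0bin, hvp.symm, ?_⟩
      rw [hvp, hblen0]
      have : (padded.drop n).length ≠ 0 := by
        intro h
        exact hdne (List.eq_nil_of_length_eq_zero h)
      omega
    have hpos : 0 < val padded := by
      rw [hvp]
      exact val_pos_of_head1 _ hhead
    have hfuelB : (padded.drop n).length < val padded + 1 := by
      rw [hvp]
      have := blen_le_self (val (padded.drop n))
      omega
    have hsim := sim G gs hgs hgv hglen hgl hg1 ((padded.drop n).length)
      (padded.drop n) (val padded) ((padded.drop n).length + 1) (val padded + 1)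
      hrep0 rfl (by omega) hfuelB
    rw [hR0]
    set Rf := loopA ((padded.drop n).length + 1) (padded.drop n) gs with hRf
    obtain ⟨hrepf, hflen⟩ := hsim
    have hnb : natBin (modGo (val padded + 1) G (val padded)) = Rf := natBin_repv _ _ hrepf
    rw [hnb]
    have hfl1 : 1 ≤ Rf.length := by
      have := hrepf.2.2
      omega
    have hzf : PySem.Chars.zfill Rf ((blen G : Int) - 1)
        = List.replicate (blen G - 1 - Rf.length) '0' ++ Rf := by
      have hcast : ((blen G : Int) - 1) = ((blen G - 1 : Nat) : Int) := by omega
      rw [hcast]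
      apply zfill_nosign Rf (blen G - 1) (by intro h; rw [h] at hfl1; simp at hfl1)
      intro c hch
      obtain ⟨t, ht⟩ := List.head?_eq_some_iff.mp hch
      have hcb : isBin c = true := by
        have := List.all_eq_true.mp hrepf.1
        exact this c (by rw [ht]; simp)
      rcases isBin_cases c hcb with h | h <;> subst h <;> exact ⟨by decide, by decide⟩
    rw [hzf]
    have hrep : gs.length - Rf.length - 1 = blen G - 1 - Rf.length := by omega
    rw [hrep]
    have hlen3 : (List.replicate (blen G - 1 - Rf.length) '0' ++ Rf).length = blen G - 1 := by
      simp
      omega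
    rw [hlen3]
    have hcast2 : ((blen G - 1 : Nat) : Int) = (blen G : Int) - 1 := by omega
    rw [hcast2]

-- ===== main equivalence on the list level =====
theorem core_eq (msgL : List Char) (d : Int) (hd : d ≤ 8)
    (hbin : ((msgL.dropWhile (fun c => c ≠ '1')).all (fun c => c == '0' || c == '1')) = true)
    (hnD : ¬ (('1' ∉ msgL) ∧ 15 ≤ msgL.length ∧ msgL.getLast? ≠ some '0')) :
    bchCoreA msgL d = bchCoreB msgL d := by
  have hrange := rangeEq d hd
  simp only [bchCoreA, bchCoreB, hrange]
  by_cases h4 : d ≤ 4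
  · rw [if_pos h4]
    simp only [List.foldl_nil]
    have eA : (PySem.Int.ofCharsBase?
        (PySem.Chars.join [] ((polyA.getD 1 []).map (fun x => PySem.Int.toChars x))) 2).getD 0
        = (19 : Int) := by decide
    have eB : polyB.getD 1 0 = 19 := by decide
    rw [eA, eB]
    have e1 : ((19 : Int)).toNat = (19 : Nat) := rfl
    rw [e1]
    exact assemble msgL 19 (natBin 19) (by decide) (by decide) (by decide) (by decide)
      (by decide) (by decide) hbin hnD
  · rw [if_neg h4]
    by_cases h6 : d ≤ 6
    · rw [if_pos h6]
      have eA : List.foldl (fun g i => multiplyA g (polyA.getD i []))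
          ((PySem.Int.ofCharsBase?
            (PySem.Chars.join [] ((polyA.getD 1 []).map (fun x => PySem.Int.toChars x))) 2).getD 0)
          [3] = (465 : Int) := by decide
      have eB : List.foldl (fun g i => clmul g (polyB.getD i 0)) (polyB.getD 1 0) [3] = 465 := by
        decide
      rw [eA, eB]
      have e1 : ((465 : Int)).toNat = (465 : Nat) := rfl
      rw [e1]
      exact assemble msgL 465 (natBin 465) (by decide) (by decide) (by decide) (by decide)
        (by decide) (by decide) hbin hnD
    · rw [if_neg h6]
      have eA : List.foldl (fun g i => multiplyA g (polyA.getD i []))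
          ((PySem.Int.ofCharsBase?
            (PySem.Chars.join [] ((polyA.getD 1 []).map (fun x => PySem.Int.toChars x))) 2).getD 0)
          [3, 5] = (1335 : Int) := by decide
      have eB : List.foldl (fun g i => clmul g (polyB.getD i 0)) (polyB.getD 1 0) [3, 5] = 1335 := by
        decide
      rw [eA, eB]
      have e1 : ((1335 : Int)).toNat = (1335 : Nat) := rfl
      rw [e1]
      exact assemble msgL 1335 (natBin 1335) (by decide) (by decide) (by decide) (by decide)
        (by decide) (by decide) hbin hnD

-- ===== VERDICT (by name: the statement is the Claim_ definition above) =====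
theorem bch_spec : Claim_equal_bch := by
  intro msg d _ hpre
  unfold Spec_bch bch bch_alt
  obtain ⟨hd, hbin, hnD⟩ := hpre
  have : bchCoreA msg.toList d = bchCoreB msg.toList d := by
    apply core_eq _ _ hd hbin
    intro hD
    exact hnD ⟨hD.1, by simpa using hD.2.1, hD.2.2⟩
  rw [this]
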